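-- pv_equiv track=rewrite | github.com/vamsikrishna07/Amazon-OA | splitPrefixSuffix.py | splitPrefixSuffix
-- ===== SOURCE A (Python) =====
-- def splitPrefixSuffix( categories, k ):
--     n, res = len(categories), 0
--     count_prefix, count_suffix, prefix_set, suffix_set = [0]*n, [0]*n, set(), set()
--     for i in range(n):
--         prefix_set.add(categories[i])
--         count_prefix[i] = len(prefix_set)
--     for i in range(n-1,-1,-1):
--         suffix_set.add(categories[i])
--         count_suffix[i] = len(suffix_set)
--     for i in range(n-1):
--         if count_prefix[i]>k and count_suffix[i+1]>k:
--             res += 1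
--     return res
-- ===== SOURCE B (Python) =====
-- def splitPrefixSuffix(categories, k):
--     # Valid split points form a contiguous range because the prefix distinct
--     # count is non-decreasing and the suffix distinct count is non-increasing:
--     # find the two boundaries and return the size of the interval.
--     n = len(categories)
--     seen = set()
--     a = n
--     for i, c in enumerate(categories):
--         seen.add(c)
--         if len(seen) > k:
--             a = i
--             break
--     if a == n:
--         return 0
--     seen = set()
--     b = -1
--     for j in range(n - 1, 0, -1):
--         seen.add(categories[j])
--         if len(seen) > k:
--             b = j - 1
--             break
--     return max(0, b - a + 1)
-- ===== Notes on version B (the rewrite author's own statement) =====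
-- stated objective: faster
-- what changed: Instead of materialising both full distinct-count arrays and testing every split point, B exploits monotonicity of the prefix/suffix distinct counts: it scans forward only until the prefix count first exceeds k and backward only until the suffix count first exceeds k, then returns the size of the resulting contiguous index interval by arithmetic.
import Mathlib
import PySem

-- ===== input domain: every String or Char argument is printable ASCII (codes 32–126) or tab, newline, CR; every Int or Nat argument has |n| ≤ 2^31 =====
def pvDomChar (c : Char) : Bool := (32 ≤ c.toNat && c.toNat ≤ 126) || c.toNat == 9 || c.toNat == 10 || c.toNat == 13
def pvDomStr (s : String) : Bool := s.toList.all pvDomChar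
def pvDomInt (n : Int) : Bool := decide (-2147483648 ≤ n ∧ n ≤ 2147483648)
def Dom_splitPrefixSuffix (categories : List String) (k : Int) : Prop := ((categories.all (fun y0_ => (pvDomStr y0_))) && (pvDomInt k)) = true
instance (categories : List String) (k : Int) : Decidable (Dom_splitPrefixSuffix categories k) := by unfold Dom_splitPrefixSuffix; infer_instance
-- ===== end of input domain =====

-- B replaces A's three full passes and two count arrays by two boundary scans that stop at the
-- first index where the prefix (resp. suffix) distinct count exceeds k, plus interval arithmetic.

-- ===== PORT A =====
-- loop body shared by A's two counting loops: s.add(categories[i]); arr[i] = len(s)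
def pvCountStep (categories : List String) (st : PySem.Set String × List Int) (i : Int) :
    PySem.Set String × List Int :=
  let s := PySem.Set.add st.1 (PySem.List.pyGetD categories i "")
  (s, PySem.List.pySetD st.2 i (PySem.Set.len s))

def splitPrefixSuffix (categories : List String) (k : Int) : Int :=
  let n : Int := PySem.List.len categories
  let res : Int := 0
  -- first loop: for i in range(n): prefix_set.add(categories[i]); count_prefix[i] = len(prefix_set)
  let st1 := (PySem.List.pyRange 0 n 1).foldl (pvCountStep categories)
    ((PySem.Set.empty : PySem.Set String), List.replicate n.toNat 0)
  let count_prefix := st1.2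
  -- second loop: for i in range(n-1,-1,-1): suffix_set.add(categories[i]); count_suffix[i] = len(suffix_set)
  let st2 := (PySem.List.pyRange (n - 1) (-1) (-1)).foldl (pvCountStep categories)
    ((PySem.Set.empty : PySem.Set String), List.replicate n.toNat 0)
  let count_suffix := st2.2
  -- third loop: for i in range(n-1): if count_prefix[i]>k and count_suffix[i+1]>k: res += 1
  (PySem.List.pyRange 0 (n - 1) 1).foldl
    (fun res i =>
      if PySem.List.pyGetD count_prefix i 0 > k ∧ PySem.List.pyGetD count_suffix (i + 1) 0 > k
      then res + 1 else res) res

-- ===== PORT B =====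
-- B's first loop: enumerate with break; 'none' is the Python sentinel 'a == n' (no break happened)
def pvScanFwd (l : List String) (i : Int) (seen : PySem.Set String) (k : Int) : Option Int :=
  match l with
  | [] => none
  | c :: rest =>
    let seen' := PySem.Set.add seen c
    if k < PySem.Set.len seen' then some i
    else pvScanFwd rest (i + 1) seen' k

-- B's second loop: for j in range(n-1, 0, -1) with break; returns b (init -1, set to j-1 on break)
def pvScanIdx (categories : List String) (js : List Int) (seen : PySem.Set String) (k : Int) : Int :=
  match js with
  | [] => -1
  | j :: rest =>
    let seen' := PySem.Set.add seen (PySem.List.pyGetD categories j "")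
    if k < PySem.Set.len seen' then j - 1
    else pvScanIdx categories rest seen' k

def splitPrefixSuffix_alt (categories : List String) (k : Int) : Int :=
  let n : Int := PySem.List.len categories
  match pvScanFwd categories 0 (PySem.Set.empty : PySem.Set String) k with
  | none => 0
  | some a =>
    let b := pvScanIdx categories (PySem.List.pyRange (n - 1) 0 (-1)) (PySem.Set.empty : PySem.Set String) k
    max 0 (b - a + 1)

-- ===== PRECONDITION & SPEC =====
def Spec_splitPrefixSuffix (categories : List String) (k : Int) (out : Int) : Prop := out = splitPrefixSuffix_alt categories k
instance (categories : List String) (k : Int) (out : Int) : Decidable (Spec_splitPrefixSuffix categories k out) := by unfold Spec_splitPrefixSuffix; infer_instance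

-- ===== CLAIM (what is proved, stated in full; the proofs are below) =====
def Claim_equal_splitPrefixSuffix : Prop := ∀ (categories : List String) (k : Int), Dom_splitPrefixSuffix categories k → Spec_splitPrefixSuffix categories k (splitPrefixSuffix categories k)

-- ===== LEMMAS AND PROOFS =====

-- distinct count of the (i+1)-element prefix / of the suffix starting at j
def pcF (cats : List String) (i : Nat) : Int := (((cats.take (i + 1)).toFinset.card : Nat) : Int)
def scF (cats : List String) (j : Nat) : Int := (((cats.drop j).toFinset.card : Nat) : Int)

theorem pv_set_add_toFinset (s : PySem.Set String) (c : String) :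
    (PySem.Set.add s c).toFinset = insert c s.toFinset := by
  rw [PySem.Set.add_eq_ite]
  by_cases h : c ∈ s
  · simp only [h, if_true]
    exact (Finset.insert_eq_self.mpr (List.mem_toFinset.mpr h)).symm
  · simp only [h, if_false, List.toFinset_append, List.toFinset_cons, List.toFinset_nil]
    rw [Finset.insert_eq, Finset.union_comm]
    rfl

theorem pv_set_len_eq (s : PySem.Set String) (hs : s.Nodup) :
    PySem.Set.len s = ((s.toFinset.card : Nat) : Int) := by
  have : PySem.Set.len s = (s.length : Int) := by simp [PySem.Set.len]
  rw [this, List.toFinset_card_of_nodup hs]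

theorem pc_mono (cats : List String) {p q : Nat} (h : p ≤ q) : pcF cats p ≤ pcF cats q := by
  unfold pcF
  have hsub : cats.take (p + 1) ⊆ cats.take (q + 1) :=
    List.take_subset_take_left cats (by omega)
  have : (cats.take (p + 1)).toFinset ⊆ (cats.take (q + 1)).toFinset := by
    intro x hx
    exact List.mem_toFinset.mpr (hsub (List.mem_toFinset.mp hx))
  exact_mod_cast Finset.card_le_card this

theorem sc_anti (cats : List String) {p q : Nat} (h : p ≤ q) : scF cats q ≤ scF cats p := by
  unfold scF
  have hsub : cats.drop q ⊆ cats.drop p := List.drop_subset_drop_left cats h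
  have : (cats.drop q).toFinset ⊆ (cats.drop p).toFinset := by
    intro x hx
    exact List.mem_toFinset.mpr (hsub (List.mem_toFinset.mp hx))
  exact_mod_cast Finset.card_le_card this

theorem count_interval (a b : Nat) : ∀ m : Nat,
    (List.range m).countP (fun x => decide (a ≤ x ∧ x ≤ b)) = min (b + 1) m - min a m := by
  intro m
  induction m with
  | zero => simp
  | succ m ih =>
    rw [List.range_succ, List.countP_append, ih]
    by_cases hm : a ≤ m ∧ m ≤ b <;> simp [hm] <;> omega

theorem scanFwd_spec (k : Int) : ∀ (l : List String) (i : Int) (s : PySem.Set String), s.Nodup →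
    (pvScanFwd l i s k = none ∧
      ∀ p : Nat, p < l.length → (((s.toFinset ∪ (l.take (p + 1)).toFinset).card : Nat) : Int) ≤ k) ∨
    (∃ t : Nat, t < l.length ∧ pvScanFwd l i s k = some (i + t) ∧
      k < (((s.toFinset ∪ (l.take (t + 1)).toFinset).card : Nat) : Int) ∧
      ∀ p : Nat, p < t → (((s.toFinset ∪ (l.take (p + 1)).toFinset).card : Nat) : Int) ≤ k) := by
  intro l
  induction l with
  | nil =>
    intro i s _
    left
    refine ⟨rfl, ?_⟩
    intro p hp
    simp at hp
  | cons c rest ih =>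
    intro i s hs
    have hrw : pvScanFwd (c :: rest) i s k =
        if k < PySem.Set.len (PySem.Set.add s c) then some i
        else pvScanFwd rest (i + 1) (PySem.Set.add s c) k := rfl
    have hnod : (PySem.Set.add s c).Nodup := PySem.Set.nodup_add s c hs
    have htf : (PySem.Set.add s c).toFinset = insert c s.toFinset := pv_set_add_toFinset s c
    have hlen : PySem.Set.len (PySem.Set.add s c) = (((insert c s.toFinset).card : Nat) : Int) := by
      rw [pv_set_len_eq _ hnod, htf]
    have htake : ∀ p : Nat, (s.toFinset ∪ ((c :: rest).take (p + 1)).toFinset)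
        = ((PySem.Set.add s c).toFinset ∪ (rest.take p).toFinset) := by
      intro p
      rw [htf, List.take_cons (by omega), List.toFinset_cons, Finset.union_insert, Finset.insert_union]
      norm_num
    by_cases hcond : k < PySem.Set.len (PySem.Set.add s c)
    · right
      refine ⟨0, by simp, ?_, ?_, ?_⟩
      · rw [hrw, if_pos hcond]
        norm_num
      · rw [htake 0]
        simp only [List.take_zero, List.toFinset_nil, Finset.union_empty]
        rw [hlen] at hcond
        rw [htf]
        exact hcond
      · intro p hp
        omega
    · have hle : PySem.Set.len (PySem.Set.add s c) ≤ k := by omega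
      rcases ih (i + 1) (PySem.Set.add s c) hnod with ⟨hnone, hall⟩ | ⟨t, htl, heq, hkt, hprev⟩
      · left
        refine ⟨by rw [hrw, if_neg hcond]; exact hnone, ?_⟩
        intro p hp
        rw [htake p]
        match p with
        | 0 =>
          simp only [List.take_zero, List.toFinset_nil, Finset.union_empty]
          rw [pv_set_len_eq _ hnod] at hle
          exact hle
        | p' + 1 =>
          exact hall p' (by simpa using hp)
      · right
        refine ⟨t + 1, by simpa using htl, ?_, ?_, ?_⟩
        · rw [hrw, if_neg hcond, heq]
          congr 1
          push_cast
          ring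
        · rw [htake (t + 1)]
          exact hkt
        · intro p hp
          rw [htake p]
          match p with
          | 0 =>
            simp only [List.take_zero, List.toFinset_nil, Finset.union_empty]
            rw [pv_set_len_eq _ hnod] at hle
            exact hle
          | p' + 1 =>
            exact hprev p' (by omega)

theorem scanIdx_spec (cats : List String) (k : Int) : ∀ (a : Nat) (s : PySem.Set String),
    a < cats.length → s.Nodup → s.toFinset = (cats.drop (a + 1)).toFinset →
    (pvScanIdx cats (PySem.List.pyRange (a : Int) 0 (-1)) s k = -1 ∧
      ∀ j : Nat, 1 ≤ j → j ≤ a → scF cats j ≤ k) ∨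
    (∃ j : Nat, 1 ≤ j ∧ j ≤ a ∧
      pvScanIdx cats (PySem.List.pyRange (a : Int) 0 (-1)) s k = (j : Int) - 1 ∧
      k < scF cats j ∧ ∀ j' : Nat, j < j' → j' ≤ a → scF cats j' ≤ k) := by
  intro a
  induction a with
  | zero =>
    intro s _ _ _
    left
    constructor
    · rw [PySem.List.pyRange_neg_one_eq_nil (by norm_num)]
      rfl
    · intro j hj1 hj2
      omega
  | succ a ih =>
    intro s hlt hs htf
    have ha : a + 1 < cats.length := hlt
    have hcast : ((a + 1 : Nat) : Int) - 1 = ((a : Nat) : Int) := by push_cast; ring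
    have hcons : PySem.List.pyRange ((a + 1 : Nat) : Int) 0 (-1)
        = ((a + 1 : Nat) : Int) :: PySem.List.pyRange ((a : Nat) : Int) 0 (-1) := by
      rw [PySem.List.pyRange_neg_one_cons (by exact_mod_cast Nat.succ_pos a), hcast]
    have hget : PySem.List.pyGetD cats ((a + 1 : Nat) : Int) "" = cats[a + 1] := by
      rw [PySem.List.pyGetD_natCast]
      exact List.getD_eq_getElem cats "" ha
    have hnod : (s.add cats[a + 1]).Nodup := PySem.Set.nodup_add s _ hs
    have htf' : (s.add cats[a + 1]).toFinset = (cats.drop (a + 1)).toFinset := by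
      rw [pv_set_add_toFinset, htf, List.drop_eq_getElem_cons ha, List.toFinset_cons]
    have hlen : PySem.Set.len (s.add cats[a + 1]) = scF cats (a + 1) := by
      rw [pv_set_len_eq _ hnod, htf']
      rfl
    have hrw : pvScanIdx cats (PySem.List.pyRange ((a + 1 : Nat) : Int) 0 (-1)) s k
        = if k < scF cats (a + 1) then ((a + 1 : Nat) : Int) - 1
          else pvScanIdx cats (PySem.List.pyRange ((a : Nat) : Int) 0 (-1)) (s.add cats[a + 1]) k := by
      rw [hcons]
      show (if k < PySem.Set.len (s.add (PySem.List.pyGetD cats ((a + 1 : Nat) : Int) "")) then ((a + 1 : Nat) : Int) - 1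
        else pvScanIdx cats (PySem.List.pyRange ((a : Nat) : Int) 0 (-1)) (s.add (PySem.List.pyGetD cats ((a + 1 : Nat) : Int) "")) k) = _
      rw [hget, hlen]
    by_cases hcond : k < scF cats (a + 1)
    · right
      exact ⟨a + 1, by omega, le_refl _, by rw [hrw, if_pos hcond], hcond, by omega⟩
    · have hle : scF cats (a + 1) ≤ k := by omega
      rcases ih (s.add cats[a + 1]) (by omega) hnod htf' with ⟨hnone, hall⟩ | ⟨j, hj1, hj2, heq, hkj, hafter⟩
      · left
        refine ⟨by rw [hrw, if_neg hcond]; exact hnone, ?_⟩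
        intro j hj1 hj2
        by_cases hje : j = a + 1
        · rw [hje]; exact hle
        · exact hall j hj1 (by omega)
      · right
        refine ⟨j, hj1, by omega, by rw [hrw, if_neg hcond]; exact heq, hkj, ?_⟩
        intro j' hj'1 hj'2
        by_cases hje : j' = a + 1
        · rw [hje]; exact hle
        · exact hafter j' hj'1 (by omega)

theorem prefLoop (cats : List String) : ∀ m : Nat, m ≤ cats.length →
    ∀ r : PySem.Set String × List Int,
    r = (PySem.List.pyRange 0 (m : Int) 1).foldl (pvCountStep cats)
      ((PySem.Set.empty : PySem.Set String), List.replicate cats.length 0) →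
    r.1.Nodup ∧ r.1.toFinset = (cats.take m).toFinset ∧ r.2.length = cats.length ∧
      ∀ i : Nat, i < cats.length →
        PySem.List.pyGetD r.2 (i : Int) 0 = if i < m then pcF cats i else 0 := by
  intro m
  induction m with
  | zero =>
    intro _ r hr
    rw [Nat.cast_zero, PySem.List.pyRange_one_eq_nil (le_refl 0), List.foldl_nil] at hr
    subst hr
    refine ⟨List.nodup_nil, by simp, List.length_replicate, ?_⟩
    intro i hi
    simp [List.getD_eq_getElem?_getD, hi]
  | succ m ih =>
    intro hm1 r hr
    have hmlt : m < cats.length := hm1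
    obtain ⟨h1, h2, h3, h4⟩ := ih (by omega) _ rfl
    rw [show ((m + 1 : Nat) : Int) = (m : Int) + 1 by push_cast; ring,
      PySem.List.pyRange_one_succ_right (by omega), List.foldl_append, List.foldl_cons,
      List.foldl_nil] at hr
    rw [show ∀ st : PySem.Set String × List Int, ∀ i : Int, pvCountStep cats st i
        = (PySem.Set.add st.1 (PySem.List.pyGetD cats i ""),
            PySem.List.pySetD st.2 i (PySem.Set.len (PySem.Set.add st.1 (PySem.List.pyGetD cats i ""))))
      from fun _ _ => rfl] at hr
    have hget : PySem.List.pyGetD cats ((m : Nat) : Int) "" = cats[m] := by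
      rw [PySem.List.pyGetD_natCast]
      exact List.getD_eq_getElem cats "" hmlt
    rw [hget] at hr
    set r' := (PySem.List.pyRange 0 (m : Int) 1).foldl (pvCountStep cats)
      ((PySem.Set.empty : PySem.Set String), List.replicate cats.length 0) with hr'
    have hnod : (r'.1.add cats[m]).Nodup := PySem.Set.nodup_add r'.1 _ h1
    have htf' : (r'.1.add cats[m]).toFinset = (cats.take (m + 1)).toFinset := by
      rw [pv_set_add_toFinset, h2, List.take_succ_eq_append_getElem hmlt,
        List.toFinset_append, List.toFinset_cons, List.toFinset_nil, Finset.insert_eq,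
        Finset.union_comm]
      rfl
    have hlen' : PySem.Set.len (r'.1.add cats[m]) = pcF cats m := by
      rw [pv_set_len_eq _ hnod, htf']
      rfl
    subst hr
    refine ⟨hnod, htf', by rw [PySem.List.length_pySetD]; exact h3, ?_⟩
    intro i hi
    dsimp only
    rw [PySem.List.pyGetD_pySetD_natCast r'.2 m i _ 0 (by rw [h3]; exact hmlt), hlen']
    by_cases hie : i = m
    · subst hie
      rw [if_pos rfl, if_pos (by omega)]
    · rw [if_neg hie, h4 i hi]
      by_cases him : i < m
      · rw [if_pos him, if_pos (by omega)]
      · rw [if_neg him, if_neg (by omega)]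

theorem sufLoop (cats : List String) : ∀ (a : Nat) (s : PySem.Set String) (arr : List Int),
    a ≤ cats.length → s.Nodup → s.toFinset = (cats.drop a).toFinset → arr.length = cats.length →
    ∀ r : PySem.Set String × List Int,
    r = (PySem.List.pyRange ((a : Int) - 1) (-1) (-1)).foldl (pvCountStep cats) (s, arr) →
    r.2.length = cats.length ∧
      ∀ i : Nat, i < cats.length →
        PySem.List.pyGetD r.2 (i : Int) 0 = if i < a then scF cats i else PySem.List.pyGetD arr (i : Int) 0 := by
  intro a
  induction a with
  | zero =>
    intro s arr _ _ _ hlenarr r hr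
    rw [show ((0 : Nat) : Int) - 1 = (-1 : Int) by norm_num,
      PySem.List.pyRange_neg_one_eq_nil (le_refl (-1)), List.foldl_nil] at hr
    subst hr
    exact ⟨hlenarr, by intro i hi; simp⟩
  | succ a ih =>
    intro s arr hlt hs htf hlenarr r hr
    have ha : a < cats.length := hlt
    have hget : PySem.List.pyGetD cats ((a : Nat) : Int) "" = cats[a] := by
      rw [PySem.List.pyGetD_natCast]
      exact List.getD_eq_getElem cats "" ha
    have hnod : (s.add cats[a]).Nodup := PySem.Set.nodup_add s _ hs
    have htf' : (s.add cats[a]).toFinset = (cats.drop a).toFinset := by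
      rw [pv_set_add_toFinset, htf, List.drop_eq_getElem_cons ha, List.toFinset_cons]
    have hlen' : PySem.Set.len (s.add cats[a]) = scF cats a := by
      rw [pv_set_len_eq _ hnod, htf']
      rfl
    rw [show ((a + 1 : Nat) : Int) - 1 = ((a : Nat) : Int) by push_cast; ring,
      PySem.List.pyRange_neg_one_cons (by omega), List.foldl_cons] at hr
    rw [show ∀ st : PySem.Set String × List Int, ∀ i : Int, pvCountStep cats st i
        = (PySem.Set.add st.1 (PySem.List.pyGetD cats i ""),
            PySem.List.pySetD st.2 i (PySem.Set.len (PySem.Set.add st.1 (PySem.List.pyGetD cats i ""))))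
      from fun _ _ => rfl] at hr
    dsimp only at hr
    rw [hget, hlen'] at hr
    obtain ⟨ih1, ih2⟩ := ih (s.add cats[a]) (PySem.List.pySetD arr ((a : Nat) : Int) (scF cats a))
      (by omega) hnod htf' (by rw [PySem.List.length_pySetD]; exact hlenarr) r hr
    refine ⟨ih1, ?_⟩
    intro i hi
    rw [ih2 i hi]
    by_cases him : i < a
    · rw [if_pos him, if_pos (by omega)]
    · rw [if_neg him, PySem.List.pyGetD_pySetD_natCast arr a i _ 0 (by rw [hlenarr]; exact ha)]
      by_cases hie : i = a
      · subst hie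
        rw [if_pos rfl, if_pos (by omega)]
      · rw [if_neg hie, if_neg (by omega)]

-- ===== VERDICT (by name: the statement is the Claim_ definition above) =====
theorem splitPrefixSuffix_spec : Claim_equal_splitPrefixSuffix := by
  intro cats k _
  unfold Spec_splitPrefixSuffix splitPrefixSuffix splitPrefixSuffix_alt
  simp only [PySem.List.len_eq, Int.toNat_natCast]
  obtain ⟨h1, h2, h3, h4⟩ := prefLoop cats cats.length (le_refl _) _ rfl
  obtain ⟨hs3, hs4⟩ := sufLoop cats cats.length (PySem.Set.empty : PySem.Set String)
    (List.replicate cats.length 0) (le_refl _) List.nodup_nil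
    (by simp [PySem.Set.empty, List.drop_length]) (List.length_replicate) _ rfl
  set cp := (List.foldl (pvCountStep cats) (PySem.Set.empty, List.replicate cats.length 0)
    (PySem.List.pyRange 0 (cats.length : Int) 1)).2 with hcp
  set cs := (List.foldl (pvCountStep cats) (PySem.Set.empty, List.replicate cats.length 0)
    (PySem.List.pyRange ((cats.length : Int) - 1) (-1) (-1))).2 with hcs
  refine (PySem.List.foldl_ite_add_one (fun i : Int =>
    PySem.List.pyGetD cp i 0 > k ∧ PySem.List.pyGetD cs (i + 1) 0 > k)
    (PySem.List.pyRange 0 ((cats.length : Int) - 1) 1) 0).trans ?_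
  rcases scanFwd_spec k cats 0 (PySem.Set.empty : PySem.Set String) List.nodup_nil
    with ⟨hnone, hall⟩ | ⟨t, htl, heq, hkt, hprev⟩
  · rw [hnone]
    have hallpc : ∀ p : Nat, p < cats.length → pcF cats p ≤ k := by
      intro p hp
      have := hall p hp
      simpa [pcF, PySem.Set.empty] using this
    rw [List.countP_eq_zero.mpr ?_]
    · norm_num
    · intro x hx
      rw [PySem.List.mem_pyRange_one] at hx
      obtain ⟨t', rfl⟩ : ∃ t' : Nat, x = (t' : Int) := ⟨x.toNat, by omega⟩
      simp only [decide_eq_true_eq, not_and, not_lt]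
      intro hcp1
      rw [h4 t' (by omega), if_pos (by omega)] at hcp1
      exact absurd hcp1 (not_lt.mpr (hallpc t' (by omega)))
  · have hm1 : 1 ≤ cats.length := by omega
    have hpc : k < pcF cats t := by simpa [pcF, PySem.Set.empty] using hkt
    have hprevpc : ∀ p : Nat, p < t → pcF cats p ≤ k := by
      intro p hp
      simpa [pcF, PySem.Set.empty] using hprev p hp
    have hpc_iff : ∀ p : Nat, (k < pcF cats p ↔ t ≤ p) := by
      intro p
      constructor
      · intro h
        by_contra hc
        exact absurd h (not_lt.mpr (hprevpc p (by omega)))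
      · intro h
        exact lt_of_lt_of_le hpc (pc_mono cats h)
    rw [heq]
    simp only [zero_add]
    have hcast1 : ((cats.length - 1 : Nat) : Int) = (cats.length : Int) - 1 := by omega
    rcases scanIdx_spec cats k (cats.length - 1) (PySem.Set.empty : PySem.Set String)
      (by omega) List.nodup_nil
      (by rw [show cats.length - 1 + 1 = cats.length by omega, List.drop_length]
          simp [PySem.Set.empty])
      with ⟨hidx, hall2⟩ | ⟨j, hj1, hj2, hidx, hkj, hafter⟩
    · rw [hcast1] at hidx
      rw [hidx]
      rw [List.countP_eq_zero.mpr ?_]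
      · simp
        omega
      · intro x hx
        rw [PySem.List.mem_pyRange_one] at hx
        obtain ⟨t', rfl⟩ : ∃ t' : Nat, x = (t' : Int) := ⟨x.toNat, by omega⟩
        simp only [decide_eq_true_eq, not_and, not_lt]
        intro _
        rw [show (t' : Int) + 1 = ((t' + 1 : Nat) : Int) by push_cast; ring,
          hs4 (t' + 1) (by omega), if_pos (by omega)]
        exact hall2 (t' + 1) (by omega) (by omega)
    · have hsc_iff : ∀ j'' : Nat, 1 ≤ j'' → j'' ≤ cats.length - 1 → (k < scF cats j'' ↔ j'' ≤ j) := by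
        intro j'' hle1 hle2
        constructor
        · intro h
          by_contra hc
          exact absurd h (not_lt.mpr (hafter j'' (by omega) hle2))
        · intro h
          exact lt_of_lt_of_le hkj (sc_anti cats h)
      rw [hcast1] at hidx
      rw [hidx]
      rw [List.countP_congr ?_ (q := fun x : Int => decide ((t : Int) ≤ x ∧ x ≤ (j : Int) - 1))]
      · rw [PySem.List.pyRange_one, List.countP_map,
          show ((cats.length : Int) - 1 - 0).toNat = cats.length - 1 by omega]
        rw [List.countP_congr ?_ (q := fun x : Nat => decide (t ≤ x ∧ x ≤ j - 1))]
        · rw [count_interval]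
          omega
        · intro x hx
          rw [List.mem_range] at hx
          simp only [Function.comp, decide_eq_true_eq, zero_add]
          omega
      · intro x hx
        rw [PySem.List.mem_pyRange_one] at hx
        obtain ⟨t', rfl⟩ : ∃ t' : Nat, x = (t' : Int) := ⟨x.toNat, by omega⟩
        simp only [decide_eq_true_eq]
        rw [show (t' : Int) + 1 = ((t' + 1 : Nat) : Int) by push_cast; ring,
          hs4 (t' + 1) (by omega), if_pos (by omega), h4 t' (by omega), if_pos (by omega)]
        rw [gt_iff_lt, gt_iff_lt, hpc_iff t', hsc_iff (t' + 1) (by omega) (by omega)]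
        omega
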